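-- pv_equiv track=rewrite | github.com/exstyle/collatz-glued-grid-seam-automaton | code/dual_bellman_ford_certificate.py | bellman_ford_difference_constraints
-- ===== SOURCE A (Python) =====
-- def bellman_ford_difference_constraints(nodes, edges_ub):
--     # edges_ub: list of (u,v,c) meaning  h[v] - h[u] <= c
--     # super-source trick: init all h=0, relax |V|-1 times, detect negative cycle by any further improv.
--     idx = {v:i for i,v in enumerate(nodes)}
--     n = len(nodes)
--     h = [0]*(n)  # all zeros is a valid starting point
--     for _ in range(n-1):
--         changed = False
--         for (u,v,c) in edges_ub:
--             iu, iv = idx[u], idx[v]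
--             if h[iv] > h[iu] + c:
--                 h[iv] = h[iu] + c
--                 changed = True
--         if not changed:
--             break
--     # detect negative cycle (infeasible system)
--     for (u,v,c) in edges_ub:
--         iu, iv = idx[u], idx[v]
--         if h[iv] > h[iu] + c:
--             raise RuntimeError("Infeasible constraints: negative cycle detected with upper bounds.")
--     # normalize to make min(h)=0 for readability
--     mn = min(h)
--     h = [x - mn for x in h]
--     return {nodes[i]: h[i] for i in range(n)}
-- ===== SOURCE B (Python) =====
-- def bellman_ford_difference_constraints(nodes, edges_ub):
--     # Jacobi value-iteration over incoming-edge lists, fixpoint stop,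
--     # lower-bound threshold for negative-cycle detection.
--     idx = {v: i for i, v in enumerate(nodes)}
--     n = len(nodes)
--     incoming = [[(idx[u], c) for (u, v, c) in edges_ub if idx[v] == i] for i in range(n)]
--     slack = max([-c for (u, v, c) in edges_ub if c < 0], default=0)
--     lo = -(n - 1) * slack  # no feasible potential (normalized to start 0) can go below this
--     h = [0] * n
--     while True:
--         h2 = [min([h[i]] + [h[j] + c for (j, c) in incoming[i]]) for i in range(n)]
--         if h2 == h:
--             break
--         if min(h2) < lo:
--             raise RuntimeError("Infeasible constraints: negative cycle detected with upper bounds.")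
--         h = h2
--     mn = min(h)  # ValueError on empty nodes, like A
--     return {nodes[i]: h[i] - mn for i in range(n)}
-- ===== Notes on version B (the rewrite author's own statement) =====
-- stated objective: alternative
-- what changed: Replaces A's in-place Gauss-Seidel sweeps over the edge list (with a changed-flag, a fixed n-1 round cap and a separate verification pass that raises) by a synchronous Jacobi value-iteration: a per-target incoming-edge index is built once, each round recomputes a fresh potential array per node from the previous one, the loop stops at the first fixpoint, and infeasibility (negative cycle) is detected by the potential dropping below the closed-form lower bound -(n-1)*max(0,-min c) instead of a final re-check pass.
import Mathlib
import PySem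

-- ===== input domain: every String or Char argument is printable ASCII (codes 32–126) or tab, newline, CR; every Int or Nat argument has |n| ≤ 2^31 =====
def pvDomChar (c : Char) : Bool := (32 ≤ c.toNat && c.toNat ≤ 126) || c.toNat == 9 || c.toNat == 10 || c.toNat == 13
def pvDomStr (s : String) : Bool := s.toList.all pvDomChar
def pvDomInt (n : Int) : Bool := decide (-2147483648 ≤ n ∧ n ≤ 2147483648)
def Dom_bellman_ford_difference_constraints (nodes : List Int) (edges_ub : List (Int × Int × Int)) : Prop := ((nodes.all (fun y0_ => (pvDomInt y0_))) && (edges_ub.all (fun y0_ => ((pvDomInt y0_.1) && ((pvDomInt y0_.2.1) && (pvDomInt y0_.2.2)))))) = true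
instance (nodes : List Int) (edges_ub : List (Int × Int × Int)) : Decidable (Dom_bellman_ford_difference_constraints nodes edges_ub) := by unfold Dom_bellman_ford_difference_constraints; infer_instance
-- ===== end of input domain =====

-- B replaces A's in-place Gauss-Seidel edge sweeps (+ final verification pass) by synchronous
-- Jacobi rounds over a per-target incoming-edge index with a fixpoint stop and a closed-form
-- lower-bound infeasibility test; objective: alternative (same worst-case cost).

-- idx = {v: i for i, v in enumerate(nodes)} — shared helper (both Pythons build this dict)
def mkIdx (nodes : List Int) : PySem.Dict Int Int :=
  (PySem.List.enumerate nodes 0).foldl (fun d p => d.insert p.2 p.1) PySem.Dict.empty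

-- ===== PORT A =====

-- one iteration of A's inner 'for (u,v,c) in edges_ub' body, acting on (h, changed)
def pvRelaxA (idx : PySem.Dict Int Int) (st : List Int × Bool) (e : Int × Int × Int) :
    List Int × Bool :=
  let iu := (idx.getD e.1 0).toNat
  let iv := (idx.getD e.2.1 0).toNat
  if st.1.getD iu 0 + e.2.2 < st.1.getD iv 0 then
    (st.1.set iv (st.1.getD iu 0 + e.2.2), true)
  else st

-- one pass of A over all edges, starting with changed = False
def pvPassA (idx : PySem.Dict Int Int) (edges_ub : List (Int × Int × Int)) (h : List Int) :
    List Int × Bool :=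
  edges_ub.foldl (pvRelaxA idx) (h, false)

-- 'for _ in range(n-1): … if not changed: break'
def pvLoopA (idx : PySem.Dict Int Int) (edges_ub : List (Int × Int × Int)) :
    Nat → List Int → List Int
  | 0, h => h
  | k + 1, h =>
    let st := pvPassA idx edges_ub h
    if st.2 then pvLoopA idx edges_ub k st.1 else st.1

def bellman_ford_difference_constraints (nodes : List Int) (edges_ub : List (Int × Int × Int)) : List (Int × Int) :=
  let idx := mkIdx nodes
  let n := nodes.length
  let h := pvLoopA idx edges_ub (n - 1) (List.replicate n 0)
  -- detection pass: Python raises RuntimeError here (excluded by Pre_); sentinel []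
  if edges_ub.any (fun e =>
      h.getD (idx.getD e.1 0).toNat 0 + e.2.2 < h.getD (idx.getD e.2.1 0).toNat 0) then []
  else
    match PySem.List.min? h (fun x => x) with
    | none => []   -- min([]) raises ValueError (excluded by Pre_)
    | some mn =>
      ((List.range n).foldl
        (fun d i => d.insert (nodes.getD i 0) ((h.map (fun x => x - mn)).getD i 0))
        PySem.Dict.empty).items

-- ===== PORT B =====

-- one Jacobi round: h2 = [min([h[i]] + [h[j] + c for (j, c) in incoming[i]]) for i in range(n)]
def pvRoundB (n : Nat) (inc : List (List (Int × Int))) (h : List Int) : List Int :=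
  (List.range n).map (fun i =>
    (PySem.List.min?
      (h.getD i 0 :: (inc.getD i []).map (fun p => h.getD p.1.toNat 0 + p.2))
      (fun x => x)).getD 0)

-- 'while True: …' — fueled; under Pre_ the loop provably reaches its fixpoint within n rounds
def pvLoopB (n : Nat) (inc : List (List (Int × Int))) (lo : Int) :
    Nat → List Int → List Int
  | 0, h => h
  | f + 1, h =>
    let h2 := pvRoundB n inc h
    if h2 = h then h
    else if (PySem.List.min? h2 (fun x => x)).getD 0 < lo then []  -- RuntimeError (excluded by Pre_)
    else pvLoopB n inc lo f h2

def bellman_ford_difference_constraints_alt (nodes : List Int) (edges_ub : List (Int × Int × Int)) : List (Int × Int) :=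
  let idx := mkIdx nodes
  let n := nodes.length
  let inc := (List.range n).map (fun (i : Nat) =>
    edges_ub.filterMap (fun e =>
      if idx.getD e.2.1 0 = (i : Int) then some (idx.getD e.1 0, e.2.2) else none))
  let slack := (PySem.List.max?
      (edges_ub.filterMap (fun e => if e.2.2 < 0 then some (-e.2.2) else none))
      (fun x => x)).getD 0
  let lo := -((n : Int) - 1) * slack
  let h := pvLoopB n inc lo (n + 1) (List.replicate n 0)
  match PySem.List.min? h (fun x => x) with
  | none => []   -- min([]) raises ValueError (excluded by Pre_)
  | some mn =>
    ((List.range n).foldl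
      (fun d i => d.insert (nodes.getD i 0) (h.getD i 0 - mn))
      PySem.Dict.empty).items

-- ===== PRECONDITION & SPEC =====

-- spec-side edge list with resolved indices (iu, iv, c)
def pvEIdx (nodes : List Int) (edges_ub : List (Int × Int × Int)) : List (Nat × Nat × Int) :=
  edges_ub.map (fun e =>
    (((mkIdx nodes).getD e.1 0).toNat, ((mkIdx nodes).getD e.2.1 0).toNat, e.2.2))

-- one synchronous relaxation step (the min-plus 'Bellman operator')
def pvJStep (n : Nat) (E : List (Nat × Nat × Int)) (h : List Int) : List Int :=
  (List.range n).map (fun i =>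
    ((E.filter (fun e => e.2.1 = i)).map (fun e => h.getD e.1 0 + e.2.2)).foldl min (h.getD i 0))

-- k-fold iterate of the Bellman operator from the all-zero potential
def pvW (n : Nat) (E : List (Nat × Nat × Int)) : Nat → List Int
  | 0 => List.replicate n 0
  | k + 1 => pvJStep n E (pvW n E k)

-- Pre_ excludes exactly the inputs on which A raises: empty `nodes` (min([]) ValueError),
-- an edge endpoint absent from `nodes` (KeyError), and infeasible systems — stated closed-form
-- as 'the Bellman operator iterated from 0 is stationary after n-1 steps', the standard
-- min-plus characterization of 'no negative cycle' (= A raises RuntimeError otherwise).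
def Pre_bellman_ford_difference_constraints (nodes : List Int) (edges_ub : List (Int × Int × Int)) : Prop :=
  nodes ≠ [] ∧ (∀ e ∈ edges_ub, e.1 ∈ nodes ∧ e.2.1 ∈ nodes) ∧
  pvW nodes.length (pvEIdx nodes edges_ub) nodes.length
    = pvW nodes.length (pvEIdx nodes edges_ub) (nodes.length - 1)

instance (nodes : List Int) (edges_ub : List (Int × Int × Int)) : Decidable (Pre_bellman_ford_difference_constraints nodes edges_ub) := by
  unfold Pre_bellman_ford_difference_constraints; infer_instance

def pvWitness_bellman_ford_difference_constraints : List Int × (List (Int × Int × Int)) :=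
  ([0, 1], [(0, 1, -1)])

def Spec_bellman_ford_difference_constraints (nodes : List Int) (edges_ub : List (Int × Int × Int)) (out : List (Int × Int)) : Prop := out = bellman_ford_difference_constraints_alt nodes edges_ub
instance (nodes : List Int) (edges_ub : List (Int × Int × Int)) (out : List (Int × Int)) : Decidable (Spec_bellman_ford_difference_constraints nodes edges_ub out) := by unfold Spec_bellman_ford_difference_constraints; infer_instance

-- ===== CLAIM (what is proved, stated in full; the proofs are below) =====
def Claim_equal_bellman_ford_difference_constraints : Prop := ∀ (nodes : List Int) (edges_ub : List (Int × Int × Int)), Dom_bellman_ford_difference_constraints nodes edges_ub → Pre_bellman_ford_difference_constraints nodes edges_ub → Spec_bellman_ford_difference_constraints nodes edges_ub (bellman_ford_difference_constraints nodes edges_ub)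

-- ===== LEMMAS AND PROOFS =====

-- pointwise order on potential arrays (out-of-range slots default to 0)
def pvLe (a b : List Int) : Prop := ∀ i : Nat, a.getD i 0 ≤ b.getD i 0

theorem pvLe_refl (a : List Int) : pvLe a a := fun _ => le_refl _

theorem pvLe_trans {a b c : List Int} (h1 : pvLe a b) (h2 : pvLe b c) : pvLe a c :=
  fun i => le_trans (h1 i) (h2 i)

theorem pv_getD_eq_zero {a : List Int} {i : Nat} (h : a.length ≤ i) : a.getD i 0 = 0 := by
  simp [List.getD_eq_getElem?_getD, List.getElem?_eq_none (by omega : a.length ≤ i)]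

theorem pvLe_antisymm {a b : List Int} (hl : a.length = b.length)
    (h1 : pvLe a b) (h2 : pvLe b a) : a = b := by
  apply List.ext_getElem hl
  intro i hia hib
  have e1 := h1 i; have e2 := h2 i
  rw [List.getD_eq_getElem _ _ hia, List.getD_eq_getElem _ _ hib] at e1 e2
  omega

theorem pv_getD_set (l : List Int) (j : Nat) (x : Int) (i : Nat) :
    (l.set j x).getD i 0 = if i = j ∧ j < l.length then x else l.getD i 0 := by
  simp only [List.getD_eq_getElem?_getD, List.getElem?_set]
  split_ifs with h1 h2 h3 h3 <;> simp_all <;> omega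

-- ---- foldl min helpers ----
theorem pv_foldl_min_le_init (l : List Int) (b : Int) : l.foldl min b ≤ b := by
  induction l generalizing b with
  | nil => simp
  | cons x t ih => exact le_trans (ih (min b x)) (min_le_left _ _)

theorem pv_foldl_min_le_mem {l : List Int} {y : Int} (b : Int) (h : y ∈ l) :
    l.foldl min b ≤ y := by
  induction l generalizing b with
  | nil => cases h
  | cons x t ih =>
    rcases List.mem_cons.1 h with rfl | hy
    · exact le_trans (pv_foldl_min_le_init t (min b y)) (min_le_right _ _)
    · exact ih (min b x) hy

theorem pv_le_foldl_min {l : List Int} {x b : Int} (hb : x ≤ b) (hl : ∀ y ∈ l, x ≤ y) :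
    x ≤ l.foldl min b := by
  induction l generalizing b with
  | nil => simpa using hb
  | cons z t ih =>
    exact ih (le_min hb (hl z (List.mem_cons_self))) (fun y hy => hl y (List.mem_cons_of_mem _ hy))

theorem pv_foldl_min_map_mono {α : Type} {l : List α} {f g : α → Int} {b1 b2 : Int}
    (hb : b1 ≤ b2) (hfg : ∀ x ∈ l, f x ≤ g x) :
    (l.map f).foldl min b1 ≤ (l.map g).foldl min b2 := by
  induction l generalizing b1 b2 with
  | nil => simpa using hb
  | cons z t ih =>
    simp only [List.map_cons, List.foldl_cons]
    exact ih (min_le_min hb (hfg z (List.mem_cons_self)))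
      (fun y hy => hfg y (List.mem_cons_of_mem _ hy))

-- ---- pvJStep slot access ----
theorem pv_jstep_length (n : Nat) (E : List (Nat × Nat × Int)) (h : List Int) :
    (pvJStep n E h).length = n := by simp [pvJStep]

theorem pv_jstep_getD_lt {n : Nat} {E : List (Nat × Nat × Int)} {h : List Int} {i : Nat}
    (hi : i < n) :
    (pvJStep n E h).getD i 0
      = ((E.filter (fun e => e.2.1 = i)).map (fun e => h.getD e.1 0 + e.2.2)).foldl min
          (h.getD i 0) := by
  simp [pvJStep, List.getD_eq_getElem?_getD, hi]

theorem pv_jstep_getD_ge {n : Nat} {E : List (Nat × Nat × Int)} {h : List Int} {i : Nat}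
    (hi : n ≤ i) : (pvJStep n E h).getD i 0 = 0 :=
  pv_getD_eq_zero (by simpa [pv_jstep_length] using hi)

theorem pv_jstep_le_self {n : Nat} {E : List (Nat × Nat × Int)} {h : List Int}
    (hh : h.length = n) : pvLe (pvJStep n E h) h := by
  intro i
  by_cases hi : i < n
  · rw [pv_jstep_getD_lt hi]; exact pv_foldl_min_le_init _ _
  · rw [pv_jstep_getD_ge (by omega), pv_getD_eq_zero (by omega)]

theorem pv_jstep_mono {n : Nat} {E : List (Nat × Nat × Int)} {a b : List Int}
    (hab : pvLe a b) : pvLe (pvJStep n E a) (pvJStep n E b) := by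
  intro i
  by_cases hi : i < n
  · rw [pv_jstep_getD_lt hi, pv_jstep_getD_lt hi]
    exact pv_foldl_min_map_mono (hab i) (fun e _ => by
      have := hab e.1; omega)
  · rw [pv_jstep_getD_ge (by omega), pv_jstep_getD_ge (by omega)]

theorem pv_le_jstep_of_stable {n : Nat} {E : List (Nat × Nat × Int)} {p : List Int}
    (hp : p.length = n)
    (hstab : ∀ e ∈ E, p.getD e.2.1 0 ≤ p.getD e.1 0 + e.2.2) :
    pvLe p (pvJStep n E p) := by
  intro i
  by_cases hi : i < n
  · rw [pv_jstep_getD_lt hi]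
    refine pv_le_foldl_min (le_refl _) ?_
    intro y hy
    rcases List.mem_map.1 hy with ⟨e, heF, rfl⟩
    rcases List.mem_filter.1 heF with ⟨heE, hcond⟩
    have htgt : e.2.1 = i := by simpa using hcond
    have := hstab e heE
    rw [htgt] at this; exact this
  · rw [pv_jstep_getD_ge (by omega), pv_getD_eq_zero (by omega)]

-- ---- pvW basic facts ----
theorem pv_W_length (n : Nat) (E : List (Nat × Nat × Int)) (k : Nat) :
    (pvW n E k).length = n := by
  cases k with
  | zero => simp [pvW]
  | succ m => simp [pvW, pv_jstep_length]

theorem pv_W_le_zero (n : Nat) (E : List (Nat × Nat × Int)) (k : Nat) :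
    pvLe (pvW n E k) (pvW n E 0) := by
  induction k with
  | zero => exact pvLe_refl _
  | succ m ih =>
    exact pvLe_trans (pv_jstep_le_self (pv_W_length n E m)) ih

theorem pv_stable_le_W {n : Nat} {E : List (Nat × Nat × Int)} {p : List Int}
    (hp : p.length = n) (hp0 : pvLe p (pvW n E 0))
    (hstab : ∀ e ∈ E, p.getD e.2.1 0 ≤ p.getD e.1 0 + e.2.2) :
    ∀ k, pvLe p (pvW n E k) := by
  intro k
  induction k with
  | zero => exact hp0
  | succ m ih =>
    exact pvLe_trans (pv_le_jstep_of_stable hp hstab) (pv_jstep_mono ih)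

-- the precondition's stationarity gives per-edge stability of d = pvW n E (n-1)
theorem pv_stab_per_edge {n : Nat} {E : List (Nat × Nat × Int)}
    (hPre : pvW n E n = pvW n E (n - 1)) (hn : n ≠ 0) :
    ∀ e ∈ E, e.2.1 < n →
      (pvW n E (n - 1)).getD e.2.1 0 ≤ (pvW n E (n - 1)).getD e.1 0 + e.2.2 := by
  intro e heE htgt
  have hW : pvW n E n = pvJStep n E (pvW n E (n - 1)) := by
    obtain ⟨m, rfl⟩ : ∃ m, n = m + 1 := ⟨n - 1, by omega⟩
    simp only [Nat.add_sub_cancel]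
    rfl
  have : (pvJStep n E (pvW n E (n - 1))).getD e.2.1 0
      ≤ (pvW n E (n - 1)).getD e.1 0 + e.2.2 := by
    rw [pv_jstep_getD_lt htgt]
    refine pv_foldl_min_le_mem _ ?_
    exact List.mem_map.2 ⟨e, List.mem_filter.2 ⟨heE, by simp⟩, rfl⟩
  calc (pvW n E (n - 1)).getD e.2.1 0
      = (pvW n E n).getD e.2.1 0 := by rw [hPre]
    _ = (pvJStep n E (pvW n E (n - 1))).getD e.2.1 0 := by rw [hW]
    _ ≤ _ := this

-- once pvW is a fixpoint it stays constant
theorem pv_fix_propagate {n : Nat} {E : List (Nat × Nat × Int)} {j : Nat}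
    (hfix : pvW n E (j + 1) = pvW n E j) :
    ∀ m, j ≤ m → pvW n E m = pvW n E j := by
  intro m hm
  induction m with
  | zero => cases Nat.le_zero.1 hm; rfl
  | succ m' ih =>
    by_cases hj : j = m' + 1
    · subst hj; rfl
    · have hle : j ≤ m' := by omega
      have : pvW n E (m' + 1) = pvJStep n E (pvW n E m') := rfl
      rw [this, ih hle]; exact hfix

theorem pv_W_stab_ge {n : Nat} {E : List (Nat × Nat × Int)}
    (hPre : pvW n E n = pvW n E (n - 1)) :
    ∀ j, n - 1 ≤ j → pvW n E j = pvW n E (n - 1) := by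
  rcases Nat.eq_zero_or_pos n with hn | hn
  · subst hn
    have hfix : pvW 0 E (0 + 1) = pvW 0 E 0 := by
      have : pvJStep 0 E (pvW 0 E 0) = pvW 0 E 0 := by
        have h1 : (pvJStep 0 E (pvW 0 E 0)).length = 0 := pv_jstep_length _ _ _
        have h2 : (pvW 0 E 0).length = 0 := pv_W_length _ _ _
        rw [List.length_eq_zero_iff.1 h1, List.length_eq_zero_iff.1 h2]
      exact this
    intro j _
    exact pv_fix_propagate hfix j (Nat.zero_le _)
  · have hfix : pvW n E ((n - 1) + 1) = pvW n E (n - 1) := by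
      rw [show (n - 1) + 1 = n by omega]; exact hPre
    intro j hj
    exact pv_fix_propagate hfix j hj

-- if the operator is stationary somewhere, that value is d = pvW n E (n-1)
theorem pv_fix_is_d {n : Nat} {E : List (Nat × Nat × Int)} {j : Nat}
    (hPre : pvW n E n = pvW n E (n - 1))
    (hfix : pvW n E (j + 1) = pvW n E j) :
    pvW n E j = pvW n E (n - 1) := by
  by_cases hj : n - 1 ≤ j
  · exact pv_W_stab_ge hPre j hj
  · exact (pv_fix_propagate hfix (n - 1) (by omega)).symm

-- ---- A-side: folds of pvRelaxE ----

def pvRelaxE (st : List Int × Bool) (e : Nat × Nat × Int) : List Int × Bool :=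
  if st.1.getD e.1 0 + e.2.2 < st.1.getD e.2.1 0 then
    (st.1.set e.2.1 (st.1.getD e.1 0 + e.2.2), true)
  else st

theorem pv_relaxE_length (st : List Int × Bool) (e : Nat × Nat × Int) :
    (pvRelaxE st e).1.length = st.1.length := by
  unfold pvRelaxE; split_ifs <;> simp

theorem pv_foldlRelax_length (E : List (Nat × Nat × Int)) (st : List Int × Bool) :
    (E.foldl pvRelaxE st).1.length = st.1.length := by
  induction E generalizing st with
  | nil => rfl
  | cons e t ih => rw [List.foldl_cons, ih, pv_relaxE_length]

theorem pv_relaxE_le (st : List Int × Bool) (e : Nat × Nat × Int) :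
    pvLe (pvRelaxE st e).1 st.1 := by
  intro i
  unfold pvRelaxE
  split_ifs with h
  · simp only [pv_getD_set]
    split_ifs with h2
    · rcases h2 with ⟨rfl, _⟩; omega
    · exact le_refl _
  · exact le_refl _

theorem pv_foldlRelax_le (E : List (Nat × Nat × Int)) (st : List Int × Bool) :
    pvLe (E.foldl pvRelaxE st).1 st.1 := by
  induction E generalizing st with
  | nil => exact pvLe_refl _
  | cons e t ih => exact pvLe_trans (ih (pvRelaxE st e)) (pv_relaxE_le st e)

theorem pv_relaxE_flag_mono {st : List Int × Bool} (e : Nat × Nat × Int)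
    (h : st.2 = true) : (pvRelaxE st e).2 = true := by
  unfold pvRelaxE; split_ifs <;> simpa

theorem pv_foldlRelax_flag_mono {E : List (Nat × Nat × Int)} {st : List Int × Bool}
    (h : st.2 = true) : (E.foldl pvRelaxE st).2 = true := by
  induction E generalizing st with
  | nil => exact h
  | cons e t ih => exact ih (pv_relaxE_flag_mono e h)

theorem pv_relaxE_lower {d : List Int} {st : List Int × Bool} {e : Nat × Nat × Int}
    (hstab : d.getD e.2.1 0 ≤ d.getD e.1 0 + e.2.2) (hle : pvLe d st.1) :
    pvLe d (pvRelaxE st e).1 := by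
  intro i
  unfold pvRelaxE
  split_ifs with h
  · simp only [pv_getD_set]
    split_ifs with h2
    · rcases h2 with ⟨rfl, _⟩
      have := hle e.1
      omega
    · exact hle i
  · exact hle i

theorem pv_foldlRelax_lower {d : List Int} {E : List (Nat × Nat × Int)}
    {st : List Int × Bool}
    (hstab : ∀ e ∈ E, d.getD e.2.1 0 ≤ d.getD e.1 0 + e.2.2) (hle : pvLe d st.1) :
    pvLe d (E.foldl pvRelaxE st).1 := by
  induction E generalizing st with
  | nil => exact hle
  | cons e t ih =>
    exact ih (fun e' he' => hstab e' (List.mem_cons_of_mem _ he'))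
      (pv_relaxE_lower (hstab e (List.mem_cons_self)) hle)

theorem pv_foldlRelax_upper {n : Nat} {E : List (Nat × Nat × Int)} {w : List Int}
    {st : List Int × Bool}
    (hst : st.1.length = n) (hE : ∀ e ∈ E, e.2.1 < n) (hle : pvLe st.1 w) :
    pvLe (E.foldl pvRelaxE st).1 w ∧
      ∀ e ∈ E, (E.foldl pvRelaxE st).1.getD e.2.1 0 ≤ w.getD e.1 0 + e.2.2 := by
  induction E generalizing st with
  | nil => exact ⟨hle, by simp⟩
  | cons e t ih =>
    have hst' : (pvRelaxE st e).1.length = n := by rw [pv_relaxE_length]; exact hst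
    have hle' : pvLe (pvRelaxE st e).1 w := pvLe_trans (pv_relaxE_le st e) hle
    have htail := ih hst' (fun e' he' => hE e' (List.mem_cons_of_mem _ he')) hle'
    refine ⟨htail.1, ?_⟩
    intro e' he'
    rcases List.mem_cons.1 he' with heq | he''
    · rw [heq]
      -- bound for the edge processed first
      have hstep : (pvRelaxE st e).1.getD e.2.1 0 ≤ w.getD e.1 0 + e.2.2 := by
        unfold pvRelaxE
        split_ifs with h
        · have hiv : e.2.1 < st.1.length := by rw [hst]; exact hE e (List.mem_cons_self)
          simp only [pv_getD_set]
          split_ifs with h2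
          · have := hle e.1; omega
          · push_neg at h2
            have h3 := h2 trivial
            omega
        · have := hle e.1; omega
      calc (t.foldl pvRelaxE (pvRelaxE st e)).1.getD e.2.1 0
          ≤ (pvRelaxE st e).1.getD e.2.1 0 := pv_foldlRelax_le t (pvRelaxE st e) e.2.1
        _ ≤ w.getD e.1 0 + e.2.2 := hstep
    · exact htail.2 e' he''

theorem pv_passE_le_jstep {n : Nat} {E : List (Nat × Nat × Int)} {w h : List Int}
    (hh : h.length = n) (hE : ∀ e ∈ E, e.2.1 < n) (hle : pvLe h w) :
    pvLe (E.foldl pvRelaxE (h, false)).1 (pvJStep n E w) := by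
  have hu := pv_foldlRelax_upper (st := (h, false)) hh hE hle
  intro i
  by_cases hi : i < n
  · rw [pv_jstep_getD_lt hi]
    refine pv_le_foldl_min (hu.1 i) ?_
    intro y hy
    rcases List.mem_map.1 hy with ⟨e, heF, rfl⟩
    rcases List.mem_filter.1 heF with ⟨heE, hcond⟩
    have htgt : e.2.1 = i := by simpa using hcond
    have := hu.2 e heE
    rw [htgt] at this; exact this
  · rw [pv_jstep_getD_ge (by omega)]
    have : (E.foldl pvRelaxE (h, false)).1.length = n := by
      rw [pv_foldlRelax_length]; exact hh
    rw [pv_getD_eq_zero (by omega)]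

theorem pv_foldlRelax_flag_false {E : List (Nat × Nat × Int)} {st : List Int × Bool}
    (hf : (E.foldl pvRelaxE st).2 = false) :
    E.foldl pvRelaxE st = st ∧
      ∀ e ∈ E, ¬ (st.1.getD e.1 0 + e.2.2 < st.1.getD e.2.1 0) := by
  induction E generalizing st with
  | nil => exact ⟨rfl, by simp⟩
  | cons e t ih =>
    by_cases h : st.1.getD e.1 0 + e.2.2 < st.1.getD e.2.1 0
    · exfalso
      have : (pvRelaxE st e).2 = true := by unfold pvRelaxE; rw [if_pos h]
      have := pv_foldlRelax_flag_mono (E := t) this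
      rw [List.foldl_cons] at hf
      rw [hf] at this; cases this
    · have hstep : pvRelaxE st e = st := by unfold pvRelaxE; rw [if_neg h]
      rw [List.foldl_cons, hstep] at hf
      have := ih hf
      refine ⟨by rw [List.foldl_cons, hstep]; exact this.1, ?_⟩
      intro e' he'
      rcases List.mem_cons.1 he' with rfl | he'' 
      · exact h
      · exact this.2 e' he''

-- ---- bridges between the ports' code and the spec-side folds ----

theorem pv_passA_eq (nodes : List Int) (edges_ub : List (Int × Int × Int)) (h : List Int) :
    pvPassA (mkIdx nodes) edges_ub h
      = (pvEIdx nodes edges_ub).foldl pvRelaxE (h, false) := by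
  unfold pvPassA pvEIdx
  rw [List.foldl_map]
  rfl

theorem pv_mkIdx_getD_bound (nodes : List Int) (hne : nodes ≠ []) (k : Int) :
    0 ≤ (mkIdx nodes).getD k 0 ∧ (mkIdx nodes).getD k 0 < (nodes.length : Int) := by
  have hgen : ∀ (l : List (Int × Int)) (d : PySem.Dict Int Int),
      (∀ p ∈ l, 0 ≤ p.1 ∧ p.1 < (nodes.length : Int)) →
      (∀ k', 0 ≤ d.getD k' 0 ∧ d.getD k' 0 < (nodes.length : Int)) →
      ∀ k', 0 ≤ ((l.foldl (fun d p => d.insert p.2 p.1) d).getD k' 0) ∧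
        ((l.foldl (fun d p => d.insert p.2 p.1) d).getD k' 0) < (nodes.length : Int) := by
    intro l
    induction l with
    | nil => intro d _ hd k'; exact hd k'
    | cons p t ih =>
      intro d hl hd k'
      refine ih (d.insert p.2 p.1) (fun q hq => hl q (List.mem_cons_of_mem _ hq)) ?_ k'
      intro k''
      rw [PySem.Dict.getD_insert]
      split_ifs with h
      · exact hl p (List.mem_cons_self)
      · exact hd k''
  refine hgen (PySem.List.enumerate nodes 0) PySem.Dict.empty ?_ ?_ k
  · intro p hp
    rw [PySem.List.enumerate_eq_map_pyRange (d := 0)] at hp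
    rcases List.mem_map.1 hp with ⟨j, hj, rfl⟩
    have hb := PySem.List.mem_pyRange_one.1 hj
    rw [PySem.List.len_eq] at hb
    simp only []
    omega
  · intro k'
    have hlen : (0:Int) < nodes.length := by
      cases nodes with
      | nil => exact absurd rfl hne
      | cons a t => exact_mod_cast Nat.succ_pos t.length
    simp [PySem.Dict.getD_empty]
    omega

theorem pv_eIdx_tgt_lt (nodes : List Int) (edges_ub : List (Int × Int × Int))
    (hne : nodes ≠ []) :
    ∀ e ∈ pvEIdx nodes edges_ub, e.2.1 < nodes.length := by
  intro e he
  rcases List.mem_map.1 he with ⟨e0, _, rfl⟩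
  have := pv_mkIdx_getD_bound nodes hne e0.2.1
  simp only []
  omega

-- ---- A's outer loop returns d ----

theorem pv_loopA_eq (nodes : List Int) (edges_ub : List (Int × Int × Int))
    (hne : nodes ≠ [])
    (hPre : pvW nodes.length (pvEIdx nodes edges_ub) nodes.length
          = pvW nodes.length (pvEIdx nodes edges_ub) (nodes.length - 1)) :
    ∀ (k j : Nat) (h : List Int), h.length = nodes.length →
      pvLe (pvW nodes.length (pvEIdx nodes edges_ub) (nodes.length - 1)) h →
      pvLe h (pvW nodes.length (pvEIdx nodes edges_ub) j) →
      nodes.length - 1 ≤ k + j →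
      pvLoopA (mkIdx nodes) edges_ub k h
        = pvW nodes.length (pvEIdx nodes edges_ub) (nodes.length - 1) := by
  set n := nodes.length with hn
  set E := pvEIdx nodes edges_ub with hE
  have hnz : n ≠ 0 := by
    intro h0; exact hne (List.length_eq_zero_iff.1 (hn ▸ h0))
  have hEtgt := pv_eIdx_tgt_lt nodes edges_ub hne
  intro k
  induction k with
  | zero =>
    intro j h hlen hdle hhle hkj
    have hWj : pvW n E j = pvW n E (n - 1) := pv_W_stab_ge hPre j (by omega)
    rw [hWj] at hhle
    show h = pvW n E (n - 1)
    exact pvLe_antisymm (by rw [hlen, pv_W_length]) hhle hdle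
  | succ k ih =>
    intro j h hlen hdle hhle hkj
    show pvLoopA (mkIdx nodes) edges_ub (k + 1) h = pvW n E (n - 1)
    unfold pvLoopA
    rw [pv_passA_eq nodes edges_ub h]
    by_cases hflag : (E.foldl pvRelaxE (h, false)).2 = true
    · rw [if_pos hflag]
      apply ih (j + 1)
      · rw [pv_foldlRelax_length]; exact hlen
      · exact pv_foldlRelax_lower
          (fun e he => pv_stab_per_edge hPre hnz e he (hEtgt e he)) hdle
      · exact pv_passE_le_jstep hlen hEtgt hhle
      · omega
    · rw [if_neg hflag]
      have hff := pv_foldlRelax_flag_false (Bool.not_eq_true _ ▸ hflag)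
      rw [hff.1]
      -- h is stable, hence ≤ every pvW, hence = d
      have hstabh : ∀ e ∈ E, h.getD e.2.1 0 ≤ h.getD e.1 0 + e.2.2 := by
        intro e he; have := hff.2 e he; simp only [] at this; omega
      have hle0 : pvLe h (pvW n E 0) :=
        pvLe_trans hhle (pv_W_le_zero n E j)
      have hled : pvLe h (pvW n E (n - 1)) :=
        pv_stable_le_W hlen hle0 hstabh (n - 1)
      exact pvLe_antisymm (by rw [hlen, pv_W_length]) hled hdle

-- ---- negative-edge slack bound ----

theorem pv_slack_spec (edges_ub : List (Int × Int × Int)) :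
    0 ≤ (PySem.List.max?
        (edges_ub.filterMap (fun e => if e.2.2 < 0 then some (-e.2.2) else none))
        (fun x => x)).getD 0 ∧
      ∀ e ∈ edges_ub,
        -((PySem.List.max?
            (edges_ub.filterMap (fun e => if e.2.2 < 0 then some (-e.2.2) else none))
            (fun x => x)).getD 0) ≤ e.2.2 := by
  set l := edges_ub.filterMap (fun e => if e.2.2 < 0 then some (-e.2.2) else none) with hl
  have hpos : ∀ y ∈ l, 0 < y := by
    intro y hy
    rw [hl] at hy
    rcases List.mem_filterMap.1 hy with ⟨e, _, hsome⟩
    by_cases hc : e.2.2 < 0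
    · rw [if_pos hc] at hsome
      cases hsome; omega
    · rw [if_neg hc] at hsome; cases hsome
  cases hmax : PySem.List.max? l (fun x => x) with
  | none =>
    have hnil : l = [] := (PySem.List.max?_eq_none_iff _ _).1 hmax
    constructor
    · simp
    · intro e he
      by_cases hc : e.2.2 < 0
      · exfalso
        have : (-e.2.2) ∈ l := by
          rw [hl]
          exact List.mem_filterMap.2 ⟨e, he, by rw [if_pos hc]⟩
        rw [hnil] at this; cases this
      · simp; omega
  | some m =>
    have hmem := PySem.List.max?_mem hmax
    have hm0 : 0 < m := hpos m hmem
    constructor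
    · simp; omega
    · intro e he
      by_cases hc : e.2.2 < 0
      · have hmm : (-e.2.2) ∈ l := by
          rw [hl]
          exact List.mem_filterMap.2 ⟨e, he, by rw [if_pos hc]⟩
        have := PySem.List.max?_isMax hmax (-e.2.2) hmm
        simp at this ⊢
        omega
      · simp; omega

theorem pv_W_lower (n : Nat) (E : List (Nat × Nat × Int)) (s : Int)
    (hs : 0 ≤ s) (hcs : ∀ e ∈ E, -s ≤ e.2.2) :
    ∀ k, ∀ x ∈ pvW n E k, -(k : Int) * s ≤ x := by
  intro k
  induction k with
  | zero =>
    intro x hx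
    rw [show pvW n E 0 = List.replicate n 0 from rfl] at hx
    have := List.eq_of_mem_replicate hx
    subst this; simp
  | succ m ih =>
    intro x hx
    rw [show pvW n E (m + 1) = pvJStep n E (pvW n E m) from rfl] at hx
    unfold pvJStep at hx
    rcases List.mem_map.1 hx with ⟨i, hi, rfl⟩
    have hiR : i < n := List.mem_range.1 hi
    refine pv_le_foldl_min ?_ ?_
    · -- base: (pvW n E m).getD i 0
      have hmem : (pvW n E m).getD i 0 ∈ pvW n E m := by
        rw [List.getD_eq_getElem _ _ (by rw [pv_W_length]; exact hiR)]
        exact List.getElem_mem _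
      have := ih _ hmem
      push_cast
      nlinarith [this, hs]
    · intro y hy
      rcases List.mem_map.1 hy with ⟨e, heF, rfl⟩
      rcases List.mem_filter.1 heF with ⟨heE, _⟩
      have hc := hcs e heE
      have hsrc : -(m:Int) * s ≤ (pvW n E m).getD e.1 0 := by
        by_cases hlt : e.1 < n
        · have hmem : (pvW n E m).getD e.1 0 ∈ pvW n E m := by
            rw [List.getD_eq_getElem _ _ (by rw [pv_W_length]; exact hlt)]
            exact List.getElem_mem _
          exact ih _ hmem
        · rw [pv_getD_eq_zero (by rw [pv_W_length]; omega)]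
          nlinarith
      push_cast
      nlinarith [hsrc, hc, hs]

-- ---- B-side bridges ----

theorem pv_filterMap_if_eq_filter_map {α β : Type} (l : List α) (p : α → Prop)
    [DecidablePred p] (q : α → β) :
    l.filterMap (fun a => if p a then some (q a) else none)
      = (l.filter (fun a => decide (p a))).map q := by
  induction l with
  | nil => rfl
  | cons a t ih =>
    by_cases h : p a
    · simp [List.filterMap_cons, List.filter_cons, h, ih]
    · simp [List.filterMap_cons, List.filter_cons, h, ih]

theorem pv_getD_map_range {α : Type} (f : Nat → α) {n i : Nat} (hi : i < n) (d : α) :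
    ((List.range n).map f).getD i d = f i := by
  simp [List.getD_eq_getElem?_getD, List.getElem?_map, hi]

theorem pv_roundB_eq_jstep (nodes : List Int) (edges_ub : List (Int × Int × Int))
    (hne : nodes ≠ []) (h : List Int) :
    pvRoundB nodes.length
      ((List.range nodes.length).map (fun (i : Nat) =>
        edges_ub.filterMap (fun e =>
          if (mkIdx nodes).getD e.2.1 0 = (i : Int) then
            some ((mkIdx nodes).getD e.1 0, e.2.2) else none)))
      h
      = pvJStep nodes.length (pvEIdx nodes edges_ub) h := by
  set n := nodes.length with hn
  unfold pvRoundB pvJStep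
  apply List.map_congr_left
  intro i hi
  have hiR : i < n := List.mem_range.1 hi
  -- the incoming list at slot i
  rw [pv_getD_map_range _ hiR]
  -- LHS list of candidates
  rw [List.map_filterMap]
  have hcands :
      edges_ub.filterMap (fun e =>
        ((if (mkIdx nodes).getD e.2.1 0 = (i : Int) then
            some ((mkIdx nodes).getD e.1 0, e.2.2) else none).map
          (fun p => h.getD p.1.toNat 0 + p.2)))
      = (((pvEIdx nodes edges_ub).filter (fun e => e.2.1 = i)).map
          (fun e => h.getD e.1 0 + e.2.2)) := by
    unfold pvEIdx
    rw [List.filter_map, List.map_map]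
    have h1 : edges_ub.filterMap (fun e =>
        ((if (mkIdx nodes).getD e.2.1 0 = (i : Int) then
            some ((mkIdx nodes).getD e.1 0, e.2.2) else none).map
          (fun p => h.getD p.1.toNat 0 + p.2)))
        = edges_ub.filterMap (fun e =>
            if (mkIdx nodes).getD e.2.1 0 = (i : Int) then
              some (h.getD ((mkIdx nodes).getD e.1 0).toNat 0 + e.2.2) else none) := by
      apply List.filterMap_congr
      intro e _
      by_cases hc : (mkIdx nodes).getD e.2.1 0 = (i : Int)
      · rw [if_pos hc, if_pos hc]; rfl
      · rw [if_neg hc, if_neg hc]; rfl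
    rw [h1, pv_filterMap_if_eq_filter_map]
    have h2 : edges_ub.filter (fun e => decide ((mkIdx nodes).getD e.2.1 0 = (i : Int)))
        = edges_ub.filter (fun e => decide ((((mkIdx nodes).getD e.2.1 0).toNat : Nat) = i)) := by
      apply List.filter_congr
      intro e _
      have hb := pv_mkIdx_getD_bound nodes hne e.2.1
      by_cases hc : (mkIdx nodes).getD e.2.1 0 = (i : Int)
      · have : ((mkIdx nodes).getD e.2.1 0).toNat = i := by omega
        simp [hc, this]
      · have : ¬ (((mkIdx nodes).getD e.2.1 0).toNat = i) := by omega
        simp [hc]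
        omega
    rw [h2]
    rfl
  rw [hcands, PySem.List.min?_id_cons]
  rfl



-- ---- B's loop returns d ----

theorem pv_loopB_eq (nodes : List Int) (edges_ub : List (Int × Int × Int))
    (hne : nodes ≠ []) (s lo : Int) (hs : 0 ≤ s)
    (hcs : ∀ e ∈ pvEIdx nodes edges_ub, -s ≤ e.2.2)
    (hlo : lo = -((nodes.length : Int) - 1) * s)
    (hPre : pvW nodes.length (pvEIdx nodes edges_ub) nodes.length
          = pvW nodes.length (pvEIdx nodes edges_ub) (nodes.length - 1)) :
    ∀ (f j : Nat), nodes.length ≤ f + j →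
      pvLoopB nodes.length
        ((List.range nodes.length).map (fun (i : Nat) =>
          edges_ub.filterMap (fun e =>
            if (mkIdx nodes).getD e.2.1 0 = (i : Int) then
              some ((mkIdx nodes).getD e.1 0, e.2.2) else none)))
        lo f (pvW nodes.length (pvEIdx nodes edges_ub) j)
      = pvW nodes.length (pvEIdx nodes edges_ub) (nodes.length - 1) := by
  set n := nodes.length with hn
  set E := pvEIdx nodes edges_ub with hE
  have hnz : n ≠ 0 := by
    intro h0; exact hne (List.length_eq_zero_iff.1 (hn ▸ h0))
  intro f
  induction f with
  | zero =>
    intro j hj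
    exact pv_W_stab_ge hPre j (by omega)
  | succ f ih =>
    intro j hj
    show pvLoopB n _ lo (f + 1) (pvW n E j) = pvW n E (n - 1)
    unfold pvLoopB
    rw [pv_roundB_eq_jstep nodes edges_ub hne]
    have hstep : pvJStep n E (pvW n E j) = pvW n E (j + 1) := rfl
    rw [hstep]
    by_cases heq : pvW n E (j + 1) = pvW n E j
    · rw [if_pos heq]
      exact pv_fix_is_d hPre heq
    · rw [if_neg heq]
      have hjlt : j + 1 ≤ n - 1 := by
        by_contra hgt
        have h1 : pvW n E j = pvW n E (n - 1) := pv_W_stab_ge hPre j (by omega)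
        have h2 : pvW n E (j + 1) = pvW n E (n - 1) := pv_W_stab_ge hPre (j + 1) (by omega)
        exact heq (h2.trans h1.symm)
      obtain ⟨m, hm⟩ : ∃ m, PySem.List.min? (pvW n E (j + 1)) (fun x => x) = some m := by
        cases hmm : PySem.List.min? (pvW n E (j + 1)) (fun x => x) with
        | none =>
          have := (PySem.List.min?_eq_none_iff _ _).1 hmm
          have hlen := pv_W_length n E (j + 1)
          rw [this] at hlen
          simp at hlen
          omega
        | some m => exact ⟨m, rfl⟩
      rw [hm]
      have hmem := PySem.List.min?_mem hm
      have hml : -((j + 1 : Nat) : Int) * s ≤ m := pv_W_lower n E s hs hcs (j + 1) m hmem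
      have hnotlt : ¬ ((some m).getD 0 < lo) := by
        simp only [Option.getD_some]
        rw [hlo]
        have hcast : ((j + 1 : Nat) : Int) ≤ (n : Int) - 1 := by
          push_cast; omega
        nlinarith
      rw [if_neg hnotlt]
      exact ih (j + 1) (by omega)

-- ---- A's verification pass is clean on d ----

theorem pv_checkA_false (nodes : List Int) (edges_ub : List (Int × Int × Int))
    (hne : nodes ≠ [])
    (hPre : pvW nodes.length (pvEIdx nodes edges_ub) nodes.length
          = pvW nodes.length (pvEIdx nodes edges_ub) (nodes.length - 1)) :
    edges_ub.any (fun e =>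
      (pvW nodes.length (pvEIdx nodes edges_ub) (nodes.length - 1)).getD
          ((mkIdx nodes).getD e.1 0).toNat 0 + e.2.2
        < (pvW nodes.length (pvEIdx nodes edges_ub) (nodes.length - 1)).getD
            ((mkIdx nodes).getD e.2.1 0).toNat 0) = false := by
  set n := nodes.length with hn
  set E := pvEIdx nodes edges_ub with hE
  have hnz : n ≠ 0 := by
    intro h0; exact hne (List.length_eq_zero_iff.1 (hn ▸ h0))
  have hEtgt := pv_eIdx_tgt_lt nodes edges_ub hne
  rw [List.any_eq_false]
  intro e he
  have heE : (((mkIdx nodes).getD e.1 0).toNat, ((mkIdx nodes).getD e.2.1 0).toNat, e.2.2) ∈ E := by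
    rw [hE]; exact List.mem_map.2 ⟨e, he, rfl⟩
  have := pv_stab_per_edge hPre hnz _ heE (hEtgt _ heE)
  simp only [] at this
  simp only [decide_eq_true_eq]
  omega

theorem pv_getD_map_sub (d : List Int) (m : Int) {i : Nat} (hi : i < d.length) :
    (d.map (fun x => x - m)).getD i 0 = d.getD i 0 - m := by
  simp [List.getD_eq_getElem?_getD, List.getElem?_map, List.getElem?_eq_getElem hi]

-- ---- main equivalence ----

theorem pv_main (nodes : List Int) (edges_ub : List (Int × Int × Int))
    (hne : nodes ≠ [])
    (hPre : pvW nodes.length (pvEIdx nodes edges_ub) nodes.length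
          = pvW nodes.length (pvEIdx nodes edges_ub) (nodes.length - 1)) :
    bellman_ford_difference_constraints nodes edges_ub
      = bellman_ford_difference_constraints_alt nodes edges_ub := by
  have hnz : nodes.length ≠ 0 := by
    intro h0; exact hne (List.length_eq_zero_iff.1 h0)
  have hA : pvLoopA (mkIdx nodes) edges_ub (nodes.length - 1)
      (List.replicate nodes.length 0)
      = pvW nodes.length (pvEIdx nodes edges_ub) (nodes.length - 1) := by
    refine pv_loopA_eq nodes edges_ub hne hPre (nodes.length - 1) 0
      (List.replicate nodes.length 0) (by simp) ?_ ?_ (by omega)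
    · exact pv_W_le_zero _ _ _
    · exact pvLe_refl _
  have hslack := pv_slack_spec edges_ub
  have hcs : ∀ e ∈ pvEIdx nodes edges_ub,
      -((PySem.List.max?
          (edges_ub.filterMap (fun e => if e.2.2 < 0 then some (-e.2.2) else none))
          (fun x => x)).getD 0) ≤ e.2.2 := by
    intro e he
    rcases List.mem_map.1 he with ⟨e0, he0, rfl⟩
    exact hslack.2 e0 he0
  have hB : pvLoopB nodes.length
      ((List.range nodes.length).map (fun (i : Nat) =>
        edges_ub.filterMap (fun e =>
          if (mkIdx nodes).getD e.2.1 0 = (i : Int) then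
            some ((mkIdx nodes).getD e.1 0, e.2.2) else none)))
      (-((nodes.length : Int) - 1) *
        (PySem.List.max?
          (edges_ub.filterMap (fun e => if e.2.2 < 0 then some (-e.2.2) else none))
          (fun x => x)).getD 0)
      (nodes.length + 1) (List.replicate nodes.length 0)
      = pvW nodes.length (pvEIdx nodes edges_ub) (nodes.length - 1) := by
    exact pv_loopB_eq nodes edges_ub hne _ _ hslack.1 hcs rfl hPre
      (nodes.length + 1) 0 (by omega)
  unfold bellman_ford_difference_constraints bellman_ford_difference_constraints_alt
  simp only []
  rw [hA, hB, pv_checkA_false nodes edges_ub hne hPre]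
  simp only [Bool.false_eq_true, if_false]
  obtain ⟨m, hm⟩ : ∃ m, PySem.List.min?
      (pvW nodes.length (pvEIdx nodes edges_ub) (nodes.length - 1)) (fun x => x) = some m := by
    cases hmm : PySem.List.min?
        (pvW nodes.length (pvEIdx nodes edges_ub) (nodes.length - 1)) (fun x => x) with
    | none =>
      have := (PySem.List.min?_eq_none_iff _ _).1 hmm
      have hlen := pv_W_length nodes.length (pvEIdx nodes edges_ub) (nodes.length - 1)
      rw [this] at hlen
      simp at hlen
      omega
    | some m => exact ⟨m, rfl⟩
  rw [hm]
  show (List.foldl (fun d i => d.insert (nodes.getD i 0)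
        ((List.map (fun x => x - m)
          (pvW nodes.length (pvEIdx nodes edges_ub) (nodes.length - 1))).getD i 0))
      PySem.Dict.empty (List.range nodes.length)).items
    = (List.foldl (fun d i => d.insert (nodes.getD i 0)
        ((pvW nodes.length (pvEIdx nodes edges_ub) (nodes.length - 1)).getD i 0 - m))
      PySem.Dict.empty (List.range nodes.length)).items
  congr 1
  apply PySem.List.foldl_congr_mem
  intro acc i hi
  have hiR : i < nodes.length := List.mem_range.1 hi
  rw [pv_getD_map_sub _ _ (by rw [pv_W_length]; exact hiR)]

-- ===== VERDICT (by name: the statement is the Claim_ definition above) =====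
theorem bellman_ford_difference_constraints_spec : Claim_equal_bellman_ford_difference_constraints := by
  intro nodes edges_ub _ hPre
  unfold Spec_bellman_ford_difference_constraints
  exact pv_main nodes edges_ub hPre.1 hPre.2.2
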